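-- pv_equiv track=rewrite | github.com/SHI-Labs/NATTEN | tests/utils.py | get_reverse_permutation
-- ===== SOURCE A (Python) =====
-- def get_reverse_permutation(tiled_shape, offset):
--
--     permuted_indices = list()
--     modes = len(tiled_shape) // 3
--
--     for i in range(modes):
--         permuted_indices.append(offset + i * 2)
--         permuted_indices.append(offset + modes * 2 + i)
--         permuted_indices.append(offset + i * 2 + 1)
--
--     return permuted_indices
-- ===== SOURCE B (Python) =====
-- def get_reverse_permutation(tiled_shape, offset):
--     # Value-major scatter: instead of appending index values position by
--     # position, preallocate the output and, for each value offset+k, compute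
--     # its destination slot from the inverse permutation formula.
--     modes = len(tiled_shape) // 3
--     out = [0] * (3 * modes)
--     for k in range(2 * modes):
--         out[3 * (k // 2) + 2 * (k % 2)] = offset + k
--     for k in range(2 * modes, 3 * modes):
--         out[3 * (k - 2 * modes) + 1] = offset + k
--     return out
-- ===== Notes on version B (the rewrite author's own statement) =====
-- stated objective: alternative
-- what changed: B inverts the construction: it preallocates the output and scatters each consecutive value offset+k into its destination slot computed from the inverse-permutation formula, instead of A's position-major loop that appends three computed index values per mode.
import Mathlib
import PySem

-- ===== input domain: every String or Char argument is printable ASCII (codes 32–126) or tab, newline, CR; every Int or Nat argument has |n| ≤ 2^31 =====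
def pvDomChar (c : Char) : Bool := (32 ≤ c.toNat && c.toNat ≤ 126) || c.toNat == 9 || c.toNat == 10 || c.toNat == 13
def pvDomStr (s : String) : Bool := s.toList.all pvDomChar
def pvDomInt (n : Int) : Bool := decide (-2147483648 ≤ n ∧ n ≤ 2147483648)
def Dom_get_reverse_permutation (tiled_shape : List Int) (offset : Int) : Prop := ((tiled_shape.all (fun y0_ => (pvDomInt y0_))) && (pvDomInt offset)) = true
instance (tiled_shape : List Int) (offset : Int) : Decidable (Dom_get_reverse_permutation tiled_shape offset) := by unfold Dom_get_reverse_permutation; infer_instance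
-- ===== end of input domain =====

-- B replaces A's position-major append loop by a value-major scatter: it preallocates
-- the output and writes each consecutive value offset+k into its destination slot
-- computed from the inverse-permutation formula (alternative algorithm, same cost).

-- ===== PORT A =====
def get_reverse_permutation (tiled_shape : List Int) (offset : Int) : List Int :=
  let modes : Int := PySem.Int.floordiv (tiled_shape.length : Int) 3
  (PySem.List.pyRange 0 modes 1).foldl
    (fun acc i => acc ++ [offset + i * 2, offset + modes * 2 + i, offset + i * 2 + 1]) []

-- ===== PORT B =====
-- Python's out[i] = v: all indices written here are nonnegative and in range,
-- so List.set (·.toNat) is exact (no negative-index wraparound can occur).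
def get_reverse_permutation_alt (tiled_shape : List Int) (offset : Int) : List Int :=
  let modes : Int := PySem.Int.floordiv (tiled_shape.length : Int) 3
  let out0 : List Int := List.replicate (3 * modes).toNat 0
  let out1 := (PySem.List.pyRange 0 (2 * modes) 1).foldl
    (fun a k => a.set (3 * PySem.Int.floordiv k 2 + 2 * PySem.Int.mod k 2).toNat (offset + k)) out0
  (PySem.List.pyRange (2 * modes) (3 * modes) 1).foldl
    (fun a k => a.set (3 * (k - 2 * modes) + 1).toNat (offset + k)) out1

-- ===== PRECONDITION & SPEC =====
def Spec_get_reverse_permutation (tiled_shape : List Int) (offset : Int) (out : List Int) : Prop := out = get_reverse_permutation_alt tiled_shape offset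
instance (tiled_shape : List Int) (offset : Int) (out : List Int) : Decidable (Spec_get_reverse_permutation tiled_shape offset out) := by unfold Spec_get_reverse_permutation; infer_instance

-- ===== CLAIM (what is proved, stated in full; the proofs are below) =====
def Claim_equal_get_reverse_permutation : Prop := ∀ (tiled_shape : List Int) (offset : Int), Dom_get_reverse_permutation tiled_shape offset → Spec_get_reverse_permutation tiled_shape offset (get_reverse_permutation tiled_shape offset)

-- ===== LEMMAS AND PROOFS =====

-- scatter folds preserve the length
theorem pv_length_foldl_set (l : List Nat) (f : Nat → Nat) (g : Nat → Int) (acc : List Int) :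
    (l.foldl (fun a k => a.set (f k) (g k)) acc).length = acc.length := by
  induction l generalizing acc with
  | nil => rfl
  | cons x xs ih => simp [List.foldl_cons, ih]

-- a position no iteration writes to keeps its previous content
theorem pv_scatter_miss (l : List Nat) (f : Nat → Nat) (g : Nat → Int) (acc : List Int) (p : Nat)
    (h : ∀ k ∈ l, f k ≠ p) :
    (l.foldl (fun a k => a.set (f k) (g k)) acc)[p]? = acc[p]? := by
  induction l generalizing acc with
  | nil => rfl
  | cons x xs ih =>
    rw [List.foldl_cons, ih _ (fun k hk => h k (List.mem_cons_of_mem _ hk)),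
      List.getElem?_set_ne (h x List.mem_cons_self)]

-- a position written exactly once (distinct destinations) holds the written value
theorem pv_scatter_hit (l : List Nat) (f : Nat → Nat) (g : Nat → Int) (k : Nat) :
    ∀ acc : List Int, k ∈ l → f k < acc.length → l.Pairwise (fun a b => f a ≠ f b) →
    (l.foldl (fun a j => a.set (f j) (g j)) acc)[f k]? = some (g k) := by
  induction l with
  | nil => intro acc hk; cases hk
  | cons x xs ih =>
    intro acc hk hlt hpw
    rw [List.pairwise_cons] at hpw
    rcases List.mem_cons.mp hk with rfl | hk'
    · rw [List.foldl_cons, pv_scatter_miss _ _ _ _ _ (fun b hb => (hpw.1 b hb).symm)]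
      simp [hlt]
    · rw [List.foldl_cons]
      exact ih _ hk' (by simpa using hlt) hpw.2

-- getElem? of the flatMap of three-element blocks
theorem pv_triple_get (n p : Nat) (a b c : Nat → Int) (hp : p < 3 * n) :
    ((List.range n).flatMap (fun i => [a i, b i, c i]))[p]? =
      some (if p % 3 = 0 then a (p / 3) else if p % 3 = 1 then b (p / 3) else c (p / 3)) := by
  induction n with
  | zero => omega
  | succ m ih =>
    have hl : ((List.range m).flatMap (fun i => [a i, b i, c i])).length = 3 * m := by
      simp [List.length_flatMap]
      omega
    by_cases h : p < 3 * m
    · rw [List.range_succ, List.flatMap_append,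
        List.getElem?_append_left (by rw [hl]; omega), ih h]
    · rw [List.range_succ, List.flatMap_append,
        List.getElem?_append_right (by rw [hl]; omega), hl]
      have h3 : p = 3 * m ∨ p = 3 * m + 1 ∨ p = 3 * m + 2 := by omega
      rcases h3 with rfl | rfl | rfl
      · rw [show 3 * m - 3 * m = 0 from by omega,
          if_pos (show 3 * m % 3 = 0 by omega), show 3 * m / 3 = m from by omega]
        simp
      · rw [show 3 * m + 1 - 3 * m = 1 from by omega,
          if_neg (show ¬ (3 * m + 1) % 3 = 0 by omega),
          if_pos (show (3 * m + 1) % 3 = 1 by omega),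
          show (3 * m + 1) / 3 = m from by omega]
        simp
      · rw [show 3 * m + 2 - 3 * m = 2 from by omega,
          if_neg (show ¬ (3 * m + 2) % 3 = 0 by omega),
          if_neg (show ¬ (3 * m + 2) % 3 = 1 by omega),
          show (3 * m + 2) / 3 = m from by omega]
        simp

-- A's loop is the flatMap of its per-mode triples
theorem pv_A_eq_flatMap (tiled_shape : List Int) (offset : Int) :
    get_reverse_permutation tiled_shape offset =
      (List.range (tiled_shape.length / 3)).flatMap
        (fun i : Nat => [offset + (i : Int) * 2,
                   offset + ((tiled_shape.length / 3 : Nat) : Int) * 2 + (i : Int),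
                   offset + (i : Int) * 2 + 1]) := by
  unfold get_reverse_permutation
  have hfd : PySem.Int.floordiv ((tiled_shape.length : Int)) 3 = ((tiled_shape.length / 3 : Nat) : Int) := by
    exact_mod_cast PySem.Int.floordiv_natCast tiled_shape.length 3
  simp only [hfd]
  rw [PySem.List.pyRange_one,
    show (((tiled_shape.length / 3 : Nat) : Int) - 0).toNat = tiled_shape.length / 3 from by omega,
    PySem.List.foldl_append_eq_flatMap, List.flatMap_map, List.nil_append]
  simp only [zero_add]

-- B's two scatter loops in canonical Nat form
theorem pv_B_eq_scatter (tiled_shape : List Int) (offset : Int) :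
    get_reverse_permutation_alt tiled_shape offset =
      (List.range ((tiled_shape.length / 3) : Nat)).foldl
        (fun a j => a.set (3 * j + 1) (offset + 2 * ((tiled_shape.length / 3 : Nat) : Int) + j))
        ((List.range (2 * (tiled_shape.length / 3))).foldl
          (fun a j => a.set (3 * (j / 2) + 2 * (j % 2)) (offset + j))
          (List.replicate (3 * (tiled_shape.length / 3)) 0)) := by
  unfold get_reverse_permutation_alt
  have hfd : PySem.Int.floordiv ((tiled_shape.length : Int)) 3 = ((tiled_shape.length / 3 : Nat) : Int) := by
    exact_mod_cast PySem.Int.floordiv_natCast tiled_shape.length 3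
  simp only [hfd]
  set n : Nat := tiled_shape.length / 3 with hn
  have h1 : PySem.List.pyRange 0 (2 * (n : Int)) 1 = (List.range (2 * n)).map (fun j : Nat => (j : Int)) := by
    rw [PySem.List.pyRange_one]
    rw [show ((2 * (n : Int)) - 0).toNat = 2 * n from by omega]
    exact List.map_congr_left (fun k _ => by omega)
  have h2 : PySem.List.pyRange (2 * (n : Int)) (3 * (n : Int)) 1 = (List.range n).map (fun j : Nat => 2 * (n : Int) + j) := by
    rw [PySem.List.pyRange_one]
    rw [show ((3 * (n : Int)) - 2 * (n : Int)).toNat = n from by omega]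
  have hrep : (3 * (n : Int)).toNat = 3 * n := by omega
  rw [h1, h2, hrep, List.foldl_map, List.foldl_map]
  have hInner :
      (List.range (2 * n)).foldl
        (fun (a : List Int) (j : Nat) =>
          a.set (3 * PySem.Int.floordiv ((j : Int)) 2 + 2 * PySem.Int.mod ((j : Int)) 2).toNat (offset + (j : Int)))
        (List.replicate (3 * n) 0) =
      (List.range (2 * n)).foldl
        (fun (a : List Int) (j : Nat) => a.set (3 * (j / 2) + 2 * (j % 2)) (offset + (j : Int)))
        (List.replicate (3 * n) 0) := by
    apply PySem.List.foldl_congr_mem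
    intro acc x _
    rw [show PySem.Int.floordiv ((x : Nat) : Int) 2 = ((x / 2 : Nat) : Int) from by
          exact_mod_cast PySem.Int.floordiv_natCast x 2,
        show PySem.Int.mod ((x : Nat) : Int) 2 = ((x % 2 : Nat) : Int) from by
          exact_mod_cast PySem.Int.mod_natCast x 2,
        show (3 * ((x / 2 : Nat) : Int) + 2 * ((x % 2 : Nat) : Int)).toNat = 3 * (x / 2) + 2 * (x % 2) from by omega]
  rw [hInner]
  apply PySem.List.foldl_congr_mem
  intro acc x _
  rw [show (3 * (2 * (n : Int) + (x : Int) - 2 * (n : Int)) + 1).toNat = 3 * x + 1 from by omega,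
    show offset + (2 * (n : Int) + (x : Int)) = offset + 2 * (n : Int) + (x : Int) from by ring]

-- ===== VERDICT (by name: the statement is the Claim_ definition above) =====
theorem get_reverse_permutation_spec : Claim_equal_get_reverse_permutation := by
  intro tiled_shape offset _
  unfold Spec_get_reverse_permutation
  rw [pv_A_eq_flatMap, pv_B_eq_scatter]
  set n : Nat := tiled_shape.length / 3 with hn
  set inner : List Int :=
    (List.range (2 * n)).foldl
      (fun a j => a.set (3 * (j / 2) + 2 * (j % 2)) (offset + j))
      (List.replicate (3 * n) 0) with hinner
  have hinner_len : inner.length = 3 * n := by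
    rw [hinner, pv_length_foldl_set]; simp
  have hpw2 : (List.range n).Pairwise (fun a b => 3 * a + 1 ≠ 3 * b + 1) :=
    List.pairwise_lt_range.imp (fun h => by omega)
  have hpw1 : (List.range (2 * n)).Pairwise
      (fun a b => 3 * (a / 2) + 2 * (a % 2) ≠ 3 * (b / 2) + 2 * (b % 2)) :=
    List.pairwise_lt_range.imp (fun h => by omega)
  apply List.ext_getElem?
  intro p
  by_cases hp : p < 3 * n
  · rw [pv_triple_get n p _ _ _ hp]
    by_cases h1 : p % 3 = 1
    · -- written by the second (mids) loop at j = p / 3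
      have hk : p / 3 ∈ List.range n := List.mem_range.mpr (by omega)
      have := pv_scatter_hit (List.range n) (fun j => 3 * j + 1)
        (fun j : Nat => offset + 2 * (n : Int) + (j : Int)) (p / 3) inner hk
        (by simp only [hinner_len]; omega) hpw2
      simp only [] at this
      have hfk : 3 * (p / 3) + 1 = p := by omega
      rw [hfk] at this
      rw [this, if_neg (by omega), if_pos h1]
      congr 1
      push_cast
      ring
    · -- untouched by the mids loop, written by the first (evens/odds) loop
      have hmiss : ∀ j ∈ List.range n, 3 * j + 1 ≠ p := by
        intro j _; omega
      rw [pv_scatter_miss _ _ _ _ _ hmiss, hinner]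
      by_cases h0 : p % 3 = 0
      · have hk : 2 * (p / 3) ∈ List.range (2 * n) := List.mem_range.mpr (by omega)
        have := pv_scatter_hit (List.range (2 * n)) (fun j => 3 * (j / 2) + 2 * (j % 2))
          (fun j : Nat => offset + (j : Int)) (2 * (p / 3)) (List.replicate (3 * n) 0) hk
          (by simp; omega) hpw1
        simp only [] at this
        have hfk : 3 * (2 * (p / 3) / 2) + 2 * (2 * (p / 3) % 2) = p := by omega
        rw [hfk] at this
        rw [this, if_pos h0]
        congr 1
        push_cast
        ring
      · have hk : 2 * (p / 3) + 1 ∈ List.range (2 * n) := List.mem_range.mpr (by omega)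
        have := pv_scatter_hit (List.range (2 * n)) (fun j => 3 * (j / 2) + 2 * (j % 2))
          (fun j : Nat => offset + (j : Int)) (2 * (p / 3) + 1) (List.replicate (3 * n) 0) hk
          (by simp; omega) hpw1
        simp only [] at this
        have hfk : 3 * ((2 * (p / 3) + 1) / 2) + 2 * ((2 * (p / 3) + 1) % 2) = p := by omega
        rw [hfk] at this
        rw [this, if_neg h0, if_neg h1]
        congr 1
        push_cast
        ring
  · rw [List.getElem?_eq_none (l := (List.range n).flatMap _) (by
        simp [List.length_flatMap]
        omega),
      List.getElem?_eq_none (by rw [pv_length_foldl_set, hinner_len]; omega)]
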